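-- pv_equiv track=rewrite | github.com/payel-bhunia/python_code | oddeven_seq.py | solve
-- ===== SOURCE A (Python) =====
-- def solve(A):
--     l=[]
--     prev=A[0]
--     l.append(prev)
--     for i in range(1,len(A)):
--         if (prev+A[i])%2!=0:
--             l.append(A[i])
--             prev=A[i]
--     return l
-- ===== SOURCE B (Python) =====
-- def solve(A):
--     # Stateless two-stage formulation: the kept elements are the first element plus every
--     # element whose parity differs from its IMMEDIATE predecessor (the last
--     # kept element always has the predecessor's parity), so a zip(A, A[1:])
--     # comprehension suffices -- no running 'prev' of kept elements.
--     return [A[0]] + [y for x, y in zip(A, A[1:]) if (x - y) % 2]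
-- ===== Notes on version B (the rewrite author's own statement) =====
-- stated objective: idiomatic
-- what changed: B replaces A's stateful loop tracking the last KEPT element by a stateless zip(A, A[1:]) comprehension keeping elements whose parity differs from their immediate predecessor, prepended to the first element; the equivalence rests on the invariant that the last kept element always shares the predecessor's parity, and indexing the first element means the empty list still raises IndexError like A, hence Pre_ excludes it for both.
import Mathlib
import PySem

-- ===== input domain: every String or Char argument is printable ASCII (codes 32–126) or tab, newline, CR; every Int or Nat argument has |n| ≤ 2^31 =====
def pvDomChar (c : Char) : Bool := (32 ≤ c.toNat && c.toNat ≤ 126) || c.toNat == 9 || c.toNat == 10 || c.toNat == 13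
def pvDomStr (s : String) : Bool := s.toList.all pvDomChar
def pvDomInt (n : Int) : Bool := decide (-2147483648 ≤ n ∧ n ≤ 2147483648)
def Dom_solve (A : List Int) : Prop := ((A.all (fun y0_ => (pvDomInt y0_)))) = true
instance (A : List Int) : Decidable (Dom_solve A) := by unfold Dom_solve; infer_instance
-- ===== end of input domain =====

-- B replaces A's stateful last-kept tracking loop by a stateless zip(A, A[1:]) comprehension (keep parity changes w.r.t. the immediate predecessor); both raise on [].

-- ===== PORT A =====
-- transliteration of Source A: start l with the first element as prev; for i in range(1,len(A)): if (prev+A[i])%2!=0: append, prev=A[i]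
-- (on [] Python raises IndexError when it indexes the first element; that input is outside Pre_solve)
def solve (A : List Int) : List Int :=
  match A with
  | [] => []
  | a0 :: _ =>
    ((PySem.List.pyRange 1 (A.length : Int) 1).foldl
      (fun (st : List Int × Int) i =>
        if PySem.Int.mod (st.2 + PySem.List.pyGetD A i 0) 2 ≠ 0 then
          (st.1 ++ [PySem.List.pyGetD A i 0], PySem.List.pyGetD A i 0)
        else st)
      ([a0], a0)).1

-- ===== PORT B =====
-- transliteration of Source B: the singleton of the first element ++ [y for x, y in zip(A, A[1:]) if (x - y) % 2]
-- (A[1:] = PySem.List.slice A (some 1) none; zip truncates to the shorter list, as Python's zip does;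
--  on [] Python raises IndexError when it indexes the first element, outside Pre_solve)
def solve_alt (A : List Int) : List Int :=
  match A with
  | [] => []
  | a0 :: _ =>
    [a0] ++ ((A.zip (PySem.List.slice A (some 1) none)).filter
      (fun p => PySem.Int.mod (p.1 - p.2) 2 != 0)).map Prod.snd

-- ===== PRECONDITION & SPEC =====
-- Pre_ excludes only the empty list, on which both A and B raise IndexError indexing the first element.
def Pre_solve (A : List Int) : Prop := A ≠ []
instance (A : List Int) : Decidable (Pre_solve A) := by unfold Pre_solve; infer_instance
def pvWitness_solve : List Int := ([1, 2, 4, 3])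

def Spec_solve (A : List Int) (out : List Int) : Prop := out = solve_alt A
instance (A : List Int) (out : List Int) : Decidable (Spec_solve A out) := by unfold Spec_solve; infer_instance

-- ===== CLAIM (what is proved, stated in full; the proofs are below) =====
def Claim_equal_solve : Prop := ∀ (A : List Int), Dom_solve A → Pre_solve A → Spec_solve A (solve A)

-- ===== LEMMAS AND PROOFS =====
theorem parity_step (prev x : Int) :
    PySem.Int.mod (prev + x) 2 = 0 ↔ PySem.Int.mod x 2 = PySem.Int.mod prev 2 := by
  simp only [PySem.Int.mod_eq_emod_of_pos (b := 2) (by norm_num)]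
  omega

-- the pairwise selection B computes, as a recursion on (predecessor, suffix)
def pairSel (w : Int) : List Int → List Int
  | [] => []
  | y :: ys => if PySem.Int.mod (w - y) 2 ≠ 0 then y :: pairSel y ys else pairSel y ys

theorem zip_filter_eq_pairSel (w : Int) (ys : List Int) :
    (((w :: ys).zip ys).filter (fun p => PySem.Int.mod (p.1 - p.2) 2 != 0)).map Prod.snd
      = pairSel w ys := by
  induction ys generalizing w with
  | nil => simp [pairSel]
  | cons y ys ih =>
    rcases eq_or_ne (PySem.Int.mod (w - y) 2) 0 with h | h
    · have hb : (PySem.Int.mod (w - y) 2 != 0) = false := by simp only [bne_eq_false_iff_eq]; exact h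
      simp only [List.zip_cons_cons, List.filter_cons, hb, Bool.false_eq_true, if_false, pairSel]
      rw [if_neg (not_not_intro h)]
      exact ih y
    · have hb : (PySem.Int.mod (w - y) 2 != 0) = true := by simp only [bne_iff_ne, ne_eq]; exact h
      simp only [List.zip_cons_cons, List.filter_cons, hb, if_true, List.map_cons, pairSel]
      rw [if_pos h]
      exact congrArg (y :: ·) (ih y)

-- loop invariant: A's fold from (acc, prev), with prev sharing the parity of the
-- immediate predecessor w, appends exactly B's pairwise selection from w
theorem fold_eq (rest acc : List Int) (prev w : Int)
    (hw : PySem.Int.mod prev 2 = PySem.Int.mod w 2) :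
    (rest.foldl
      (fun (st : List Int × Int) x =>
        if PySem.Int.mod (st.2 + x) 2 ≠ 0 then (st.1 ++ [x], x) else st)
      (acc, prev)).1 = acc ++ pairSel w rest := by
  induction rest generalizing acc prev w with
  | nil => simp [pairSel]
  | cons y ys ih =>
    have hsub : PySem.Int.mod (w - y) 2 = 0 ↔ PySem.Int.mod y 2 = PySem.Int.mod w 2 := by
      simp only [PySem.Int.mod_eq_emod_of_pos (b := 2) (by norm_num)]; omega
    by_cases h : PySem.Int.mod y 2 = PySem.Int.mod prev 2
    · have h0 : PySem.Int.mod (prev + y) 2 = 0 := (parity_step prev y).mpr h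
      have hw0 : ¬ PySem.Int.mod (w - y) 2 ≠ 0 := by
        simp only [ne_eq, not_not]; exact hsub.mpr (h.trans hw)
      simp only [List.foldl_cons, h0, ne_eq, not_true_eq_false, if_false, pairSel, hw0]
      exact ih acc prev y h.symm
    · have h0 : PySem.Int.mod (prev + y) 2 ≠ 0 := fun hz => h ((parity_step prev y).mp hz)
      have hw0 : PySem.Int.mod (w - y) 2 ≠ 0 := fun hz => h ((hsub.mp hz).trans hw.symm)
      simp only [List.foldl_cons, h0, ne_eq, not_false_eq_true, if_true, pairSel, hw0]
      rw [ih (acc ++ [y]) y y rfl]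
      simp

-- ===== VERDICT (by name: the statement is the Claim_ definition above) =====
theorem solve_spec : Claim_equal_solve := by
  intro A _ hpre
  match A with
  | [] => exact absurd rfl hpre
  | a0 :: rest =>
    show solve (a0 :: rest) = solve_alt (a0 :: rest)
    simp only [solve, solve_alt]
    rw [PySem.List.foldl_pyRange_pyGetD' (a0 :: rest) 0
          (fun (st : List Int × Int) x =>
            if PySem.Int.mod (st.2 + x) 2 ≠ 0 then (st.1 ++ [x], x) else st)
          ([a0], a0) (by norm_num)]
    simp only [Int.toNat_one, List.drop_succ_cons, List.drop_zero]
    rw [fold_eq rest [a0] a0 a0 rfl, PySem.List.slice_from_one,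
        List.tail_cons, zip_filter_eq_pairSel]
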